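-- pv_equiv track=rewrite | github.com/EmoryHuang/myLeetCode | 剑指Offer13.机器人的运动范围/剑指Offer13.机器人的运动范围.py | movingCount
-- ===== SOURCE A (Python) =====
-- def movingCount(m: int, n: int, k: int) -> int:
--
--     def get_sum(num: int) -> int:
--         res = 0
--         while num:
--             res += num % 10
--             num //= 10
--         return res
--
--     vis = set([(0, 0)])
--     for i in range(m):
--         for j in range(n):
--             if get_sum(i) + get_sum(j) <= k and ((i - 1, j) in vis or (i, j - 1) in vis):
--                 vis.add((i, j))
--     return len(vis)
-- ===== SOURCE B (Python) =====
-- def movingCount(m: int, n: int, k: int) -> int: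
--
--     def get_sum(num: int) -> int:
--         res = 0
--         while num:
--             res += num % 10
--             num //= 10
--         return res
--
--     vis = {(0, 0)}
--     stack = [(0, 0)]
--     while stack:
--         i, j = stack.pop()
--         for p, q in ((i + 1, j), (i, j + 1)):
--             if p < m and q < n and (p, q) not in vis and get_sum(p) + get_sum(q) <= k:
--                 vis.add((p, q))
--                 stack.append((p, q))
--     return len(vis)
-- ===== Notes on version B (the rewrite author's own statement) =====
-- stated objective: alternative
-- what changed: Replaced A's row-major DP scan over all m*n grid cells (each cell testing whether its up/left neighbour is already visited) with a DFS flood-fill from (0,0) using an explicit stack that visits only the reachable cells, expanding right/down.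
import Mathlib
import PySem

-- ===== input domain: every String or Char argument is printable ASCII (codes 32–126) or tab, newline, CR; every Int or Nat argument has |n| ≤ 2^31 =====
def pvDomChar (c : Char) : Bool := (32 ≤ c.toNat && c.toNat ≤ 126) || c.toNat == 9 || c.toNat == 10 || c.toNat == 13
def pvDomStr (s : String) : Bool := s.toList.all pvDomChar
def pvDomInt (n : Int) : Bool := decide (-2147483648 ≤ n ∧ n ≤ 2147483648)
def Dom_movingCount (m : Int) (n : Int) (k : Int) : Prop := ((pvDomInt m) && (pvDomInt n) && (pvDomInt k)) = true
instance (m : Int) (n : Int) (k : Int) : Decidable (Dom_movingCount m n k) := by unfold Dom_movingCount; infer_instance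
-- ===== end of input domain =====

-- B re-implements A's row-major dynamic-programming scan over ALL m*n cells as a DFS flood-fill
-- (explicit stack, right/down moves) that only visits the reachable cells; same return value.

-- ===== PORT A =====
-- get_sum: 'while num: res += num % 10; num //= 10'.  The guard 0 < num makes the recursion
-- total; Python's loop runs exactly on num > 0 here (it is only called on range elements ≥ 0,
-- and on num < 0 Python's loop would not terminate, so no behaviour is lost).
def pvGetSum (num : Int) : Int :=
  if _h : 0 < num then PySem.Int.mod num 10 + pvGetSum (PySem.Int.floordiv num 10) else 0
termination_by num.toNat
decreasing_by
  have h10 : PySem.Int.floordiv num 10 = num / 10 := PySem.Int.floordiv_eq_ediv_of_pos (by omega)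
  omega

def pvCellA (k i : Int) (vis : PySem.Set (Int × Int)) (j : Int) : PySem.Set (Int × Int) :=
  if pvGetSum i + pvGetSum j ≤ k ∧ ((i - 1, j) ∈ vis ∨ (i, j - 1) ∈ vis)
  then PySem.Set.add vis (i, j) else vis

def pvRowA (n k : Int) (vis : PySem.Set (Int × Int)) (i : Int) : PySem.Set (Int × Int) :=
  (PySem.List.pyRange 0 n 1).foldl (pvCellA k i) vis

def movingCount (m : Int) (n : Int) (k : Int) : Int :=
  (((PySem.List.pyRange 0 m 1).foldl (pvRowA n k)
      (PySem.Set.ofList [((0:Int), (0:Int))])).length : Int)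

-- ===== PORT B =====
-- bound used only by pvBfs's termination proof: a Nodup visited set inside the grid (plus the
-- seed) has at most m*n+1 elements
theorem pv_vis_bound {m n : Int} (vis : List (Int × Int)) (hnd : vis.Nodup)
    (hb : ∀ c ∈ vis, c = ((0:Int), (0:Int)) ∨ (0 ≤ c.1 ∧ c.1 < m ∧ 0 ≤ c.2 ∧ c.2 < n)) :
    vis.length ≤ m.toNat * n.toNat + 1 := by
  have hsub : vis.toFinset ⊆
      insert ((0:Int), (0:Int)) (Finset.Ico 0 m ×ˢ Finset.Ico 0 n) := by
    intro c hc
    rw [List.mem_toFinset] at hc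
    rcases hb c hc with h | h
    · simp [h]
    · simp only [Finset.mem_insert, Finset.mem_product, Finset.mem_Ico]
      exact Or.inr ⟨⟨h.1, h.2.1⟩, h.2.2.1, h.2.2.2⟩
  have h1 : vis.toFinset.card ≤ (insert ((0:Int), (0:Int)) (Finset.Ico 0 m ×ˢ Finset.Ico 0 n)).card :=
    Finset.card_le_card hsub
  have h2 : (insert ((0:Int), (0:Int)) (Finset.Ico 0 m ×ˢ Finset.Ico 0 n)).card
      ≤ (Finset.Ico (0:Int) m ×ˢ Finset.Ico (0:Int) n).card + 1 := by
    have := Finset.card_insert_le ((0:Int), (0:Int)) (Finset.Ico (0:Int) m ×ˢ Finset.Ico (0:Int) n)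
    omega
  have h3 : (Finset.Ico (0:Int) m ×ˢ Finset.Ico (0:Int) n).card = m.toNat * n.toNat := by
    simp [Finset.card_product, Int.card_Ico]
  have h4 : vis.toFinset.card = vis.length := List.toFinset_card_of_nodup hnd
  omega

-- DFS flood-fill with an explicit stack (held top-first; Python pushes/pops at the list's end).
-- The two-element neighbour loop 'for p, q in ((i+1,j),(i,j+1))' is unrolled into its two
-- iterations.  The three proof arguments only justify termination (visited set bounded by the
-- grid size); they do not alter the computation.
def pvBfs (m n k : Int) (vis : PySem.Set (Int × Int)) (stack : List (Int × Int))
    (hnd : vis.Nodup)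
    (hb : ∀ c ∈ vis, c = ((0:Int), (0:Int)) ∨ (0 ≤ c.1 ∧ c.1 < m ∧ 0 ≤ c.2 ∧ c.2 < n))
    (hs : ∀ c ∈ stack, 0 ≤ c.1 ∧ 0 ≤ c.2) : PySem.Set (Int × Int) :=
  match stack with
  | [] => vis
  | (i, j) :: rest =>
    have hij : 0 ≤ i ∧ 0 ≤ j := hs (i, j) (List.mem_cons_self)
    have hrest : ∀ c ∈ rest, 0 ≤ c.1 ∧ 0 ≤ c.2 := fun c hc => hs c (List.mem_cons_of_mem _ hc)
    -- first neighbour (i+1, j)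
    if h1 : i + 1 < m ∧ j < n ∧ (i + 1, j) ∉ vis ∧ pvGetSum (i + 1) + pvGetSum j ≤ k then
      have hnd1 : (PySem.Set.add vis (i + 1, j)).Nodup := PySem.Set.nodup_add _ _ hnd
      have hb1 : ∀ c ∈ PySem.Set.add vis (i + 1, j),
          c = ((0:Int), (0:Int)) ∨ (0 ≤ c.1 ∧ c.1 < m ∧ 0 ≤ c.2 ∧ c.2 < n) := by
        intro c hc
        rcases (PySem.Set.mem_add _ _ _).1 hc with hc | hc
        · exact hb c hc
        · subst hc; exact Or.inr ⟨by omega, h1.1, hij.2, h1.2.1⟩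
      -- second neighbour (i, j + 1), membership tested in the updated set
      if h2 : i < m ∧ j + 1 < n ∧ (i, j + 1) ∉ PySem.Set.add vis (i + 1, j) ∧
          pvGetSum i + pvGetSum (j + 1) ≤ k then
        pvBfs m n k (PySem.Set.add (PySem.Set.add vis (i + 1, j)) (i, j + 1))
          ((i, j + 1) :: (i + 1, j) :: rest)
          (PySem.Set.nodup_add _ _ hnd1)
          (by
            intro c hc
            rcases (PySem.Set.mem_add _ _ _).1 hc with hc | hc
            · exact hb1 c hc
            · subst hc; exact Or.inr ⟨hij.1, h2.1, by omega, h2.2.1⟩)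
          (by
            intro c hc
            rcases List.mem_cons.1 hc with hc | hc
            · subst hc; exact ⟨hij.1, by omega⟩
            rcases List.mem_cons.1 hc with hc | hc
            · subst hc; exact ⟨by omega, hij.2⟩
            · exact hrest c hc)
      else
        pvBfs m n k (PySem.Set.add vis (i + 1, j)) ((i + 1, j) :: rest) hnd1 hb1
          (by
            intro c hc
            rcases List.mem_cons.1 hc with hc | hc
            · subst hc; exact ⟨by omega, hij.2⟩
            · exact hrest c hc)
    else
      if h2 : i < m ∧ j + 1 < n ∧ (i, j + 1) ∉ vis ∧ pvGetSum i + pvGetSum (j + 1) ≤ k then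
        pvBfs m n k (PySem.Set.add vis (i, j + 1)) ((i, j + 1) :: rest)
          (PySem.Set.nodup_add _ _ hnd)
          (by
            intro c hc
            rcases (PySem.Set.mem_add _ _ _).1 hc with hc | hc
            · exact hb c hc
            · subst hc; exact Or.inr ⟨hij.1, h2.1, by omega, h2.2.1⟩)
          (by
            intro c hc
            rcases List.mem_cons.1 hc with hc | hc
            · subst hc; exact ⟨hij.1, by omega⟩
            · exact hrest c hc)
      else
        pvBfs m n k vis rest hnd hb hrest
termination_by 3 * ((m.toNat * n.toNat + 1) - vis.length) + stack.length
decreasing_by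
  · -- both neighbours added
    have hlen1 : (PySem.Set.add vis (i + 1, j)).length = vis.length + 1 := by
      rw [PySem.Set.add_of_not_mem h1.2.2.1]; simp
    have hlen2 : (PySem.Set.add (PySem.Set.add vis (i + 1, j)) (i, j + 1)).length
        = vis.length + 2 := by
      rw [PySem.Set.add_of_not_mem h2.2.2.1]; simp [hlen1]
    have hbound : (PySem.Set.add (PySem.Set.add vis (i + 1, j)) (i, j + 1)).length
        ≤ m.toNat * n.toNat + 1 := by
      apply pv_vis_bound _ (PySem.Set.nodup_add _ _ hnd1)
      intro c hc
      rcases (PySem.Set.mem_add _ _ _).1 hc with hc | hc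
      · exact hb1 c hc
      · subst hc; exact Or.inr ⟨hij.1, h2.1, by omega, h2.2.1⟩
    simp only [List.length_cons]
    omega
  · have hlen1 : (PySem.Set.add vis (i + 1, j)).length = vis.length + 1 := by
      rw [PySem.Set.add_of_not_mem h1.2.2.1]; simp
    have hbound : (PySem.Set.add vis (i + 1, j)).length ≤ m.toNat * n.toNat + 1 :=
      pv_vis_bound _ hnd1 hb1
    simp only [List.length_cons]
    omega
  · have hlen1 : (PySem.Set.add vis (i, j + 1)).length = vis.length + 1 := by
      rw [PySem.Set.add_of_not_mem h2.2.2.1]; simp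
    have hbound : (PySem.Set.add vis (i, j + 1)).length ≤ m.toNat * n.toNat + 1 := by
      apply pv_vis_bound _ (PySem.Set.nodup_add _ _ hnd)
      intro c hc
      rcases (PySem.Set.mem_add _ _ _).1 hc with hc | hc
      · exact hb c hc
      · subst hc; exact Or.inr ⟨hij.1, h2.1, by omega, h2.2.1⟩
    simp only [List.length_cons]
    omega
  · simp only [List.length_cons]
    omega

def movingCount_alt (m : Int) (n : Int) (k : Int) : Int :=
  ((pvBfs m n k (PySem.Set.ofList [((0:Int), (0:Int))]) [((0:Int), (0:Int))]
      (PySem.Set.nodup_ofList _)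
      (by intro c hc; simp [PySem.Set.ofList] at hc; subst hc; exact Or.inl rfl)
      (by intro c hc; simp at hc; subst hc; exact ⟨le_refl _, le_refl _⟩)).length : Int)

-- ===== PRECONDITION & SPEC =====
def Spec_movingCount (m : Int) (n : Int) (k : Int) (out : Int) : Prop := out = movingCount_alt m n k
instance (m : Int) (n : Int) (k : Int) (out : Int) : Decidable (Spec_movingCount m n k out) := by unfold Spec_movingCount; infer_instance

-- ===== CLAIM (what is proved, stated in full; the proofs are below) =====
def Claim_equal_movingCount : Prop := ∀ (m : Int) (n : Int) (k : Int), Dom_movingCount m n k → Spec_movingCount m n k (movingCount m n k)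

-- ===== LEMMAS AND PROOFS =====

-- A cell (i,j) passes the digit-sum test inside the grid
def pvOk (m n k i j : Int) : Prop :=
  0 ≤ i ∧ i < m ∧ 0 ≤ j ∧ j < n ∧ pvGetSum i + pvGetSum j ≤ k

-- cells reachable from the (unconditionally seeded) origin by right/down moves through
-- cells passing pvOk — the common characterisation of both programs' visited set
inductive pvReach (m n k : Int) : Int → Int → Prop
  | base : pvReach m n k 0 0
  | down {i j : Int} : pvReach m n k i j → pvOk m n k (i + 1) j → pvReach m n k (i + 1) j
  | right {i j : Int} : pvReach m n k i j → pvOk m n k i (j + 1) → pvReach m n k i (j + 1)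

theorem pvReach_nonneg {m n k i j : Int} (h : pvReach m n k i j) : 0 ≤ i ∧ 0 ≤ j := by
  cases h with
  | base => omega
  | down h ok => exact ⟨ok.1, ok.2.2.1⟩
  | right h ok => exact ⟨ok.1, ok.2.2.1⟩

theorem pvReach_cases {m n k i j : Int} (h : pvReach m n k i j) :
    (i = 0 ∧ j = 0) ∨
    (pvReach m n k (i - 1) j ∧ pvOk m n k i j) ∨
    (pvReach m n k i (j - 1) ∧ pvOk m n k i j) := by
  cases h with
  | base => exact Or.inl ⟨rfl, rfl⟩
  | down h ok => refine Or.inr (Or.inl ⟨?_, ok⟩); simpa using h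
  | right h ok => refine Or.inr (Or.inr ⟨?_, ok⟩); simpa using h

theorem pvReach_ok {m n k i j : Int} (h : pvReach m n k i j) (hne : ¬(i = 0 ∧ j = 0)) :
    pvOk m n k i j := by
  rcases pvReach_cases h with h | h | h
  · exact absurd h hne
  · exact h.2
  · exact h.2

theorem pvReach_down' {m n k i j : Int} (h : pvReach m n k (i - 1) j) (ok : pvOk m n k i j) :
    pvReach m n k i j := by
  have h1 : i - 1 + 1 = i := by omega
  have := pvReach.down h (by rw [h1]; exact ok)
  rwa [h1] at this

theorem pvReach_right' {m n k i j : Int} (h : pvReach m n k i (j - 1)) (ok : pvOk m n k i j) :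
    pvReach m n k i j := by
  have h1 : j - 1 + 1 = j := by omega
  have := pvReach.right h (by rw [h1]; exact ok)
  rwa [h1] at this

-- ---------- A side: row-major scan computes exactly the pvReach set ----------

-- invariant after A has processed every cell strictly before (i, j) in row-major order
def pvInvA (m n k : Int) (vis : PySem.Set (Int × Int)) (i j : Int) : Prop :=
  ∀ c : Int × Int, c ∈ vis ↔
    c = ((0:Int), (0:Int)) ∨ (pvReach m n k c.1 c.2 ∧ (c.1 < i ∨ (c.1 = i ∧ c.2 < j)))

theorem pvCellA_inv {m n k i j : Int} {vis : PySem.Set (Int × Int)}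
    (h0i : 0 ≤ i) (him : i < m) (h0j : 0 ≤ j) (hjn : j < n)
    (hInv : pvInvA m n k vis i j) : pvInvA m n k (pvCellA k i vis j) i (j + 1) := by
  intro c
  unfold pvCellA
  by_cases hc : pvGetSum i + pvGetSum j ≤ k ∧ ((i - 1, j) ∈ vis ∨ (i, j - 1) ∈ vis)
  · rw [if_pos hc]
    by_cases hcij : c = (i, j)
    · subst hcij
      simp only [PySem.Set.mem_add]
      constructor
      · intro _
        have hok : pvOk m n k i j := ⟨h0i, him, h0j, hjn, hc.1⟩
        rcases hc.2 with hup | hlf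
        · rcases (hInv _).1 hup with h0 | ⟨hr, _⟩
          · -- the cell above is the seed (0,0)
            have hr0 : pvReach m n k (i - 1) j := by
              rw [show i - 1 = 0 from congrArg Prod.fst h0, show j = 0 from congrArg Prod.snd h0]
              exact pvReach.base
            exact Or.inr ⟨pvReach_down' hr0 hok, by simp⟩
          · exact Or.inr ⟨pvReach_down' hr hok, by simp⟩
        · rcases (hInv _).1 hlf with h0 | ⟨hr, _⟩
          · have hr0 : pvReach m n k i (j - 1) := by
              rw [show i = 0 from congrArg Prod.fst h0, show j - 1 = 0 from congrArg Prod.snd h0]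
              exact pvReach.base
            exact Or.inr ⟨pvReach_right' hr0 hok, by simp⟩
          · exact Or.inr ⟨pvReach_right' hr hok, by simp⟩
      · intro _; exact Or.inr (by simp)
    · simp only [PySem.Set.mem_add]
      have hne : ¬ (c = (i, j)) := hcij
      have hsplit : (c.1 < i ∨ (c.1 = i ∧ c.2 < j + 1)) ↔ (c.1 < i ∨ (c.1 = i ∧ c.2 < j)) := by
        constructor
        · rintro (h | ⟨h1, h2⟩)
          · exact Or.inl h
          · by_cases h3 : c.2 = j
            · exact absurd (Prod.ext h1 h3) hne
            · exact Or.inr ⟨h1, by omega⟩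
        · rintro (h | ⟨h1, h2⟩)
          · exact Or.inl h
          · exact Or.inr ⟨h1, by omega⟩
      rw [hInv c, hsplit]
      constructor
      · rintro (h | h)
        · exact h
        · exact absurd h hne
      · exact Or.inl
  · rw [if_neg hc]
    by_cases hcij : c = (i, j)
    · subst hcij
      rw [hInv _]
      constructor
      · rintro (h0 | ⟨_, hbef⟩)
        · exact Or.inl h0
        · omega
      · rintro (h0 | ⟨hr, _⟩)
        · exact Or.inl h0
        · -- pvReach (i,j) together with ¬cond forces (i,j) = (0,0)
          rcases pvReach_cases hr with ⟨hi0, hj0⟩ | ⟨hpr, hok⟩ | ⟨hpr, hok⟩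
          · exact Or.inl (by simp only [Prod.mk.injEq]; exact ⟨hi0, hj0⟩)
          · exfalso
            apply hc
            refine ⟨hok.2.2.2.2, Or.inl ?_⟩
            rw [hInv _]
            by_cases hp0 : (i - 1, j) = ((0:Int), (0:Int))
            · exact Or.inl hp0
            · exact Or.inr ⟨hpr, by omega⟩
          · exfalso
            apply hc
            refine ⟨hok.2.2.2.2, Or.inr ?_⟩
            rw [hInv _]
            by_cases hp0 : (i, j - 1) = ((0:Int), (0:Int))
            · exact Or.inl hp0
            · exact Or.inr ⟨hpr, by omega⟩
    · have hne : ¬ (c = (i, j)) := hcij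
      have hsplit : (c.1 < i ∨ (c.1 = i ∧ c.2 < j + 1)) ↔ (c.1 < i ∨ (c.1 = i ∧ c.2 < j)) := by
        constructor
        · rintro (h | ⟨h1, h2⟩)
          · exact Or.inl h
          · by_cases h3 : c.2 = j
            · exact absurd (Prod.ext h1 h3) hne
            · exact Or.inr ⟨h1, by omega⟩
        · rintro (h | ⟨h1, h2⟩)
          · exact Or.inl h
          · exact Or.inr ⟨h1, by omega⟩
      rw [hInv c, hsplit]

theorem pvRowA_fold_inv {m n k i : Int} (h0i : 0 ≤ i) (him : i < m) :
    ∀ (t : Nat), (t : Int) ≤ n → ∀ vis : PySem.Set (Int × Int), pvInvA m n k vis i 0 →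
      pvInvA m n k ((PySem.List.pyRange 0 t 1).foldl (pvCellA k i) vis) i t := by
  intro t
  induction t with
  | zero => intro _ vis h; simpa using h
  | succ t ih =>
    intro htn vis h
    have hcast : ((t + 1 : Nat) : Int) = (t : Int) + 1 := by push_cast; ring
    rw [hcast, PySem.List.pyRange_one_succ_right (by positivity), List.foldl_append]
    simp only [List.foldl_cons, List.foldl_nil]
    exact pvCellA_inv h0i him (by positivity) (by omega) (ih (by omega) vis h)

-- shift the invariant from the end of a row to the start of the next one
theorem pvInvA_next_row {m n k i j : Int} {vis : PySem.Set (Int × Int)}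
    (hnj : n ≤ j) (hInv : pvInvA m n k vis i j) : pvInvA m n k vis (i + 1) 0 := by
  intro c
  rw [hInv c]
  by_cases h0 : c = ((0:Int), (0:Int))
  · simp [h0]
  constructor
  · rintro (h | ⟨hr, hbef⟩)
    · exact Or.inl h
    · exact Or.inr ⟨hr, Or.inl (by omega)⟩
  · rintro (h | ⟨hr, hbef⟩)
    · exact Or.inl h
    · have hok := pvReach_ok hr (by intro hh; exact h0 (by simp [Prod.ext_iff]; omega))
      obtain ⟨_, _, _, h4, _⟩ := hok
      exact Or.inr ⟨hr, by omega⟩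

theorem pvRowA_inv {m n k i : Int} {vis : PySem.Set (Int × Int)}
    (h0i : 0 ≤ i) (him : i < m) (hInv : pvInvA m n k vis i 0) :
    pvInvA m n k (pvRowA n k vis i) (i + 1) 0 := by
  unfold pvRowA
  by_cases hn : 0 ≤ n
  · have hcast : ((n.toNat : Nat) : Int) = n := by omega
    have := pvRowA_fold_inv h0i him n.toNat (by omega) vis hInv
    rw [hcast] at this
    exact pvInvA_next_row (le_refl n) this
  · rw [PySem.List.pyRange_one_eq_nil (by omega)]
    exact pvInvA_next_row (by omega) hInv

theorem pvRowsA_fold_inv (m n k : Int) :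
    ∀ (t : Nat), (t : Int) ≤ m →
      pvInvA m n k ((PySem.List.pyRange 0 t 1).foldl (pvRowA n k)
        (PySem.Set.ofList [((0:Int), (0:Int))])) t 0 := by
  intro t
  induction t with
  | zero =>
    intro _ c
    constructor
    · intro hc
      simp [PySem.Set.ofList] at hc
      exact Or.inl hc
    · rintro (h | ⟨hr, hbef⟩)
      · simp [PySem.Set.ofList, h]
      · exfalso
        have h2 := pvReach_nonneg hr
        rcases hbef with h3 | h3 <;> omega
  | succ t ih =>
    intro htm
    have hcast : ((t + 1 : Nat) : Int) = (t : Int) + 1 := by push_cast; ring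
    rw [hcast, PySem.List.pyRange_one_succ_right (by positivity), List.foldl_append]
    simp only [List.foldl_cons, List.foldl_nil]
    exact pvRowA_inv (by positivity) (by omega) (ih (by omega))

-- A's final visited set is exactly the pvReach set
theorem pvMemA (m n k : Int) (c : Int × Int) :
    c ∈ (PySem.List.pyRange 0 m 1).foldl (pvRowA n k) (PySem.Set.ofList [((0:Int), (0:Int))]) ↔
      pvReach m n k c.1 c.2 := by
  by_cases hm : 0 ≤ m
  · have hcast : ((m.toNat : Nat) : Int) = m := by omega
    have h := pvRowsA_fold_inv m n k m.toNat (by omega)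
    rw [hcast] at h
    rw [h c]
    constructor
    · rintro (h0 | ⟨hr, _⟩)
      · rw [show c.1 = 0 from congrArg Prod.fst h0, show c.2 = 0 from congrArg Prod.snd h0]
        exact pvReach.base
      · exact hr
    · intro hr
      by_cases h0 : c = ((0:Int), (0:Int))
      · exact Or.inl h0
      · have hok := pvReach_ok hr (by intro hh; exact h0 (by simp [Prod.ext_iff]; omega))
        obtain ⟨h1, h2, _, _, _⟩ := hok
        exact Or.inr ⟨hr, Or.inl (by omega)⟩
  · rw [PySem.List.pyRange_one_eq_nil (by omega)]
    simp only [List.foldl_nil]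
    constructor
    · intro hc
      simp [PySem.Set.ofList] at hc
      rw [show c.1 = 0 from congrArg Prod.fst hc, show c.2 = 0 from congrArg Prod.snd hc]
      exact pvReach.base
    · intro hr
      by_cases h0 : c = ((0:Int), (0:Int))
      · simp [PySem.Set.ofList, h0]
      · exfalso
        have hok := pvReach_ok hr (by intro hh; exact h0 (by simp [Prod.ext_iff]; omega))
        obtain ⟨h1, h2, _, _, _⟩ := hok
        omega

-- A's visited set stays duplicate-free
theorem pvNodupA (m n k : Int) :
    ((PySem.List.pyRange 0 m 1).foldl (pvRowA n k)
      (PySem.Set.ofList [((0:Int), (0:Int))])).Nodup := by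
  have hcell : ∀ (l : List Int) (i : Int) (vis : PySem.Set (Int × Int)), vis.Nodup →
      (l.foldl (pvCellA k i) vis).Nodup := by
    intro l i
    induction l with
    | nil => intro vis h; simpa using h
    | cons x xs ih =>
      intro vis h
      simp only [List.foldl_cons]
      apply ih
      unfold pvCellA
      split
      · exact PySem.Set.nodup_add _ _ h
      · exact h
  have hrow : ∀ (l : List Int) (vis : PySem.Set (Int × Int)), vis.Nodup →
      (l.foldl (pvRowA n k) vis).Nodup := by
    intro l
    induction l with
    | nil => intro vis h; simpa using h
    | cons x xs ih =>
      intro vis h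
      simp only [List.foldl_cons]
      exact ih _ (hcell _ x vis h)
  exact hrow _ _ (PySem.Set.nodup_ofList _)

-- ---------- B side: the flood-fill computes the same set ----------

-- every admissible neighbour of c is already visited
def pvClosedAt (m n k : Int) (vis : PySem.Set (Int × Int)) (c : Int × Int) : Prop :=
  (pvOk m n k (c.1 + 1) c.2 → (c.1 + 1, c.2) ∈ vis) ∧
  (pvOk m n k c.1 (c.2 + 1) → (c.1, c.2 + 1) ∈ vis)

theorem pvClosedAt_mono {m n k : Int} {v1 v2 : PySem.Set (Int × Int)} {c : Int × Int}
    (hsub : ∀ x ∈ v1, x ∈ v2) (h : pvClosedAt m n k v1 c) : pvClosedAt m n k v2 c :=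
  ⟨fun ok => hsub _ (h.1 ok), fun ok => hsub _ (h.2 ok)⟩

theorem pvBfs_main (m n k : Int) (vis : PySem.Set (Int × Int)) (stack : List (Int × Int))
    (hnd : vis.Nodup)
    (hb : ∀ c ∈ vis, c = ((0:Int), (0:Int)) ∨ (0 ≤ c.1 ∧ c.1 < m ∧ 0 ≤ c.2 ∧ c.2 < n))
    (hs : ∀ c ∈ stack, 0 ≤ c.1 ∧ 0 ≤ c.2)
    (hsv : ∀ c ∈ stack, c ∈ vis)
    (hsound : ∀ c ∈ vis, pvReach m n k c.1 c.2)
    (hclosed : ∀ c ∈ vis, c ∈ stack ∨ pvClosedAt m n k vis c) :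
    (∀ c ∈ vis, c ∈ pvBfs m n k vis stack hnd hb hs) ∧
    (∀ c ∈ pvBfs m n k vis stack hnd hb hs, pvReach m n k c.1 c.2) ∧
    (∀ c ∈ pvBfs m n k vis stack hnd hb hs, pvClosedAt m n k (pvBfs m n k vis stack hnd hb hs) c) ∧
    (pvBfs m n k vis stack hnd hb hs).Nodup := by
  revert hsv hsound hclosed
  fun_induction pvBfs
  case case1 =>
    rename_i vis hnd hb _ _
    intro _ hsound hclosed
    exact ⟨fun c hc => hc, hsound, fun c hc => (hclosed c hc).resolve_left (by simp), hnd⟩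
  case case2 =>
    rename_i vis hnd hb i j rest _ hij hrest h1 hnd1 hb1 h2 _ ih
    intro hsv hsound hclosed
    have hsub : ∀ c ∈ vis, c ∈ (vis.add (i + 1, j)).add (i, j + 1) := fun c hc =>
      (PySem.Set.mem_add _ _ _).2 (Or.inl ((PySem.Set.mem_add _ _ _).2 (Or.inl hc)))
    have hd1 : ((i + 1, j) : Int × Int) ∈ (vis.add (i + 1, j)).add (i, j + 1) :=
      (PySem.Set.mem_add _ _ _).2 (Or.inl ((PySem.Set.mem_add _ _ _).2 (Or.inr rfl)))
    have hd2 : ((i, j + 1) : Int × Int) ∈ (vis.add (i + 1, j)).add (i, j + 1) :=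
      (PySem.Set.mem_add _ _ _).2 (Or.inr rfl)
    have hrij : pvReach m n k i j := hsound (i, j) (hsv _ List.mem_cons_self)
    have hr1 : pvReach m n k (i + 1) j :=
      pvReach.down hrij ⟨by omega, h1.1, hij.2, h1.2.1, h1.2.2.2⟩
    have hr2 : pvReach m n k i (j + 1) :=
      pvReach.right hrij ⟨hij.1, h2.1, by omega, h2.2.1, h2.2.2.2⟩
    have hsv2 : ∀ c ∈ (i, j + 1) :: (i + 1, j) :: rest, c ∈ (vis.add (i + 1, j)).add (i, j + 1) := by
      intro c hc
      rcases List.mem_cons.1 hc with hc | hc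
      · subst hc; exact hd2
      rcases List.mem_cons.1 hc with hc | hc
      · subst hc; exact hd1
      · exact hsub c (hsv c (List.mem_cons_of_mem _ hc))
    have hsound2 : ∀ c ∈ (vis.add (i + 1, j)).add (i, j + 1), pvReach m n k c.1 c.2 := by
      intro c hc
      rcases (PySem.Set.mem_add _ _ _).1 hc with hc | hc
      · rcases (PySem.Set.mem_add _ _ _).1 hc with hc | hc
        · exact hsound c hc
        · subst hc; exact hr1
      · subst hc; exact hr2
    have hclosed2 : ∀ c ∈ (vis.add (i + 1, j)).add (i, j + 1),
        c ∈ (i, j + 1) :: (i + 1, j) :: rest ∨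
          pvClosedAt m n k ((vis.add (i + 1, j)).add (i, j + 1)) c := by
      intro c hc
      rcases (PySem.Set.mem_add _ _ _).1 hc with hc | hc
      · rcases (PySem.Set.mem_add _ _ _).1 hc with hc | hc
        · rcases hclosed c hc with hst | hcl
          · rcases List.mem_cons.1 hst with hst | hst
            · subst hst; exact Or.inr ⟨fun _ => hd1, fun _ => hd2⟩
            · exact Or.inl (List.mem_cons_of_mem _ (List.mem_cons_of_mem _ hst))
          · exact Or.inr (pvClosedAt_mono hsub hcl)
        · subst hc; exact Or.inl (List.mem_cons_of_mem _ List.mem_cons_self)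
      · subst hc; exact Or.inl List.mem_cons_self
    obtain ⟨iha, ihb, ihc, ihd⟩ := ih hsv2 hsound2 hclosed2
    exact ⟨fun c hc => iha c (hsub c hc), ihb, ihc, ihd⟩
  case case3 =>
    rename_i vis hnd hb i j rest _ hij hrest h1 _ _ h2 _ ih
    intro hsv hsound hclosed
    have hsub : ∀ c ∈ vis, c ∈ vis.add (i + 1, j) := fun c hc =>
      (PySem.Set.mem_add _ _ _).2 (Or.inl hc)
    have hd1 : ((i + 1, j) : Int × Int) ∈ vis.add (i + 1, j) :=
      (PySem.Set.mem_add _ _ _).2 (Or.inr rfl)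
    have hrij : pvReach m n k i j := hsound (i, j) (hsv _ List.mem_cons_self)
    have hr1 : pvReach m n k (i + 1) j :=
      pvReach.down hrij ⟨by omega, h1.1, hij.2, h1.2.1, h1.2.2.2⟩
    have hsv2 : ∀ c ∈ (i + 1, j) :: rest, c ∈ vis.add (i + 1, j) := by
      intro c hc
      rcases List.mem_cons.1 hc with hc | hc
      · subst hc; exact hd1
      · exact hsub c (hsv c (List.mem_cons_of_mem _ hc))
    have hsound2 : ∀ c ∈ vis.add (i + 1, j), pvReach m n k c.1 c.2 := by
      intro c hc
      rcases (PySem.Set.mem_add _ _ _).1 hc with hc | hc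
      · exact hsound c hc
      · subst hc; exact hr1
    have hclosed2 : ∀ c ∈ vis.add (i + 1, j),
        c ∈ (i + 1, j) :: rest ∨ pvClosedAt m n k (vis.add (i + 1, j)) c := by
      intro c hc
      rcases (PySem.Set.mem_add _ _ _).1 hc with hc | hc
      · rcases hclosed c hc with hst | hcl
        · rcases List.mem_cons.1 hst with hst | hst
          · subst hst
            refine Or.inr ⟨fun _ => hd1, fun ok => ?_⟩
            by_contra hmem
            exact h2 ⟨ok.2.1, ok.2.2.2.1, hmem, ok.2.2.2.2⟩
          · exact Or.inl (List.mem_cons_of_mem _ hst)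
        · exact Or.inr (pvClosedAt_mono hsub hcl)
      · subst hc; exact Or.inl List.mem_cons_self
    obtain ⟨iha, ihb, ihc, ihd⟩ := ih hsv2 hsound2 hclosed2
    exact ⟨fun c hc => iha c (hsub c hc), ihb, ihc, ihd⟩
  case case4 =>
    rename_i vis hnd hb i j rest _ hij hrest h1 h2 _ ih
    intro hsv hsound hclosed
    have hsub : ∀ c ∈ vis, c ∈ vis.add (i, j + 1) := fun c hc =>
      (PySem.Set.mem_add _ _ _).2 (Or.inl hc)
    have hd2 : ((i, j + 1) : Int × Int) ∈ vis.add (i, j + 1) :=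
      (PySem.Set.mem_add _ _ _).2 (Or.inr rfl)
    have hrij : pvReach m n k i j := hsound (i, j) (hsv _ List.mem_cons_self)
    have hr2 : pvReach m n k i (j + 1) :=
      pvReach.right hrij ⟨hij.1, h2.1, by omega, h2.2.1, h2.2.2.2⟩
    have hsv2 : ∀ c ∈ (i, j + 1) :: rest, c ∈ vis.add (i, j + 1) := by
      intro c hc
      rcases List.mem_cons.1 hc with hc | hc
      · subst hc; exact hd2
      · exact hsub c (hsv c (List.mem_cons_of_mem _ hc))
    have hsound2 : ∀ c ∈ vis.add (i, j + 1), pvReach m n k c.1 c.2 := by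
      intro c hc
      rcases (PySem.Set.mem_add _ _ _).1 hc with hc | hc
      · exact hsound c hc
      · subst hc; exact hr2
    have hclosed2 : ∀ c ∈ vis.add (i, j + 1),
        c ∈ (i, j + 1) :: rest ∨ pvClosedAt m n k (vis.add (i, j + 1)) c := by
      intro c hc
      rcases (PySem.Set.mem_add _ _ _).1 hc with hc | hc
      · rcases hclosed c hc with hst | hcl
        · rcases List.mem_cons.1 hst with hst | hst
          · subst hst
            refine Or.inr ⟨fun ok => ?_, fun _ => hd2⟩
            have hd1v : ((i + 1, j) : Int × Int) ∈ vis := by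
              by_contra hmem
              exact h1 ⟨ok.2.1, ok.2.2.2.1, hmem, ok.2.2.2.2⟩
            exact hsub _ hd1v
          · exact Or.inl (List.mem_cons_of_mem _ hst)
        · exact Or.inr (pvClosedAt_mono hsub hcl)
      · subst hc; exact Or.inl List.mem_cons_self
    obtain ⟨iha, ihb, ihc, ihd⟩ := ih hsv2 hsound2 hclosed2
    exact ⟨fun c hc => iha c (hsub c hc), ihb, ihc, ihd⟩
  case case5 =>
    rename_i vis hnd hb i j rest _ hij hrest h1 h2 _ ih
    intro hsv hsound hclosed
    have hsv2 : ∀ c ∈ rest, c ∈ vis := fun c hc => hsv c (List.mem_cons_of_mem _ hc)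
    have hclosed2 : ∀ c ∈ vis, c ∈ rest ∨ pvClosedAt m n k vis c := by
      intro c hc
      rcases hclosed c hc with hst | hcl
      · rcases List.mem_cons.1 hst with hst | hst
        · subst hst
          refine Or.inr ⟨fun ok => ?_, fun ok => ?_⟩
          · by_contra hmem
            exact h1 ⟨ok.2.1, ok.2.2.2.1, hmem, ok.2.2.2.2⟩
          · by_contra hmem
            exact h2 ⟨ok.2.1, ok.2.2.2.1, hmem, ok.2.2.2.2⟩
        · exact Or.inl hst
      · exact Or.inr hcl
    exact ih hsv2 hsound hclosed2


-- B's final visited set is also exactly the pvReach set, and duplicate-free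
theorem pvMemB (m n k : Int) (hnd : (PySem.Set.ofList [((0:Int), (0:Int))] : PySem.Set (Int × Int)).Nodup)
    (hb : ∀ c ∈ (PySem.Set.ofList [((0:Int), (0:Int))] : PySem.Set (Int × Int)),
      c = ((0:Int), (0:Int)) ∨ (0 ≤ c.1 ∧ c.1 < m ∧ 0 ≤ c.2 ∧ c.2 < n))
    (hs : ∀ c ∈ [((0:Int), (0:Int))], 0 ≤ c.1 ∧ 0 ≤ c.2) :
    (∀ c : Int × Int,
      c ∈ pvBfs m n k (PySem.Set.ofList [((0:Int), (0:Int))]) [((0:Int), (0:Int))] hnd hb hs ↔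
        pvReach m n k c.1 c.2) ∧
    (pvBfs m n k (PySem.Set.ofList [((0:Int), (0:Int))]) [((0:Int), (0:Int))] hnd hb hs).Nodup := by
  have hsv0 : ∀ c ∈ [((0:Int), (0:Int))],
      c ∈ (PySem.Set.ofList [((0:Int), (0:Int))] : PySem.Set (Int × Int)) := by
    intro c hc; simpa [PySem.Set.ofList] using hc
  have hsound0 : ∀ c ∈ (PySem.Set.ofList [((0:Int), (0:Int))] : PySem.Set (Int × Int)),
      pvReach m n k c.1 c.2 := by
    intro c hc
    have h0 : c = ((0:Int), (0:Int)) := by simpa [PySem.Set.ofList] using hc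
    subst h0; exact pvReach.base
  have hclosed0 : ∀ c ∈ (PySem.Set.ofList [((0:Int), (0:Int))] : PySem.Set (Int × Int)),
      c ∈ [((0:Int), (0:Int))] ∨ pvClosedAt m n k (PySem.Set.ofList [((0:Int), (0:Int))]) c := by
    intro c hc; exact Or.inl (by simpa [PySem.Set.ofList] using hc)
  obtain ⟨hsub, hsound', hclosed', hnd'⟩ :=
    pvBfs_main m n k _ _ hnd hb hs hsv0 hsound0 hclosed0
  refine ⟨fun c => ⟨fun h => hsound' c h, fun hr => ?_⟩, hnd'⟩
  have key : ∀ i j : Int, pvReach m n k i j →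
      ((i, j) : Int × Int) ∈ pvBfs m n k (PySem.Set.ofList [((0:Int), (0:Int))])
        [((0:Int), (0:Int))] hnd hb hs := by
    intro i j hr
    induction hr with
    | base => exact hsub _ (by simp [PySem.Set.ofList])
    | down h ok ih => exact (hclosed' _ ih).1 ok
    | right h ok ih => exact (hclosed' _ ih).2 ok
  simpa using key c.1 c.2 hr

-- ===== VERDICT (by name: the statement is the Claim_ definition above) =====
theorem movingCount_spec : Claim_equal_movingCount := by
  unfold Claim_equal_movingCount Spec_movingCount
  intro m n k _
  unfold movingCount movingCount_alt
  refine congrArg (Nat.cast : Nat → Int) (List.Perm.length_eq ?_)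
  exact (List.perm_ext_iff_of_nodup (pvNodupA m n k) (pvMemB m n k _ _ _).2).2
    (fun c => (pvMemA m n k c).trans ((pvMemB m n k _ _ _).1 c).symm)
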